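-- pv_equiv track=rewrite | github.com/Hoovely/Ps-Algorithm | 5월/0501 01타일_ver2.py | dp
-- ===== SOURCE A (Python) =====
-- import math
--
-- def dp(n):
--     result = 0
--     if n < 3:
--         return n
--
--     if n % 2 == 0:
--         for i in range(n//2+1):
--             if i == 0:
--                 result += 1
--             elif i == n//2:
--                 result += 1
--             else:
--                 result += math.factorial(n-i) // (math.factorial(i) * math.factorial(n-2*i))
--     else:
--         for i in range(n//2+1):
--             if i == 0:
--                 result += 1
--             else:
--                 result += math.factorial(n-i) // (math.factorial(i) * math.factorial(n-2*i))
--     return result%15746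
-- ===== SOURCE B (Python) =====
-- def dp(n):
--     if n < 3:
--         return n
--     a, b = 1, 2
--     for _ in range(n - 2):
--         a, b = b, (a + b) % 15746
--     return b
-- ===== Notes on version B (the rewrite author's own statement) =====
-- stated objective: faster
-- what changed: Replaced the quadratic bigint binomial-coefficient summation (factorials and exact division per term) with the linear Fibonacci recurrence computed mod 15746 in a single pass.
import Mathlib
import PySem

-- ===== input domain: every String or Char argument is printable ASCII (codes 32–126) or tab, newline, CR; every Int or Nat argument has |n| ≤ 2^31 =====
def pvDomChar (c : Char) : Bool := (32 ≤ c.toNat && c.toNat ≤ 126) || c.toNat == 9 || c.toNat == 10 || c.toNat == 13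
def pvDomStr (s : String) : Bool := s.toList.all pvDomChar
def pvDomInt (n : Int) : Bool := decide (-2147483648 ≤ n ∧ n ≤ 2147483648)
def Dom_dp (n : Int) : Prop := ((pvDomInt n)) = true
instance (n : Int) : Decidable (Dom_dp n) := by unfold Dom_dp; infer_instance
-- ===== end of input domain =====

-- B replaces A's quadratic bigint binomial-coefficient summation with the linear
-- Fibonacci recurrence mod 15746 (objective: faster).

-- ===== PORT A =====
-- math.factorial(k): A only calls it with k ≥ 0 (i ≤ n//2, n ≥ 3), where toNat is exact
def pyFactorial (k : Int) : Int := (Nat.factorial k.toNat : Int)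

def dp (n : Int) : Int :=
  if n < 3 then n
  else
    let result : Int :=
      if PySem.Int.mod n 2 = 0 then
        (PySem.List.pyRange 0 (PySem.Int.floordiv n 2 + 1) 1).foldl
          (fun result i =>
            if i = 0 then result + 1
            else if i = PySem.Int.floordiv n 2 then result + 1
            else result + PySem.Int.floordiv (pyFactorial (n - i))
                   (pyFactorial i * pyFactorial (n - 2 * i))) 0
      else
        (PySem.List.pyRange 0 (PySem.Int.floordiv n 2 + 1) 1).foldl
          (fun result i =>
            if i = 0 then result + 1
            else result + PySem.Int.floordiv (pyFactorial (n - i))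
                   (pyFactorial i * pyFactorial (n - 2 * i))) 0
    PySem.Int.mod result 15746

-- ===== PORT B =====
def dp_alt (n : Int) : Int :=
  if n < 3 then n
  else
    ((PySem.List.pyRange 0 (n - 2) 1).foldl
      (fun (ab : Int × Int) _ => (ab.2, PySem.Int.mod (ab.1 + ab.2) 15746))
      (1, 2)).2

-- ===== PRECONDITION & SPEC =====
def Spec_dp (n : Int) (out : Int) : Prop := out = dp_alt n
instance (n : Int) (out : Int) : Decidable (Spec_dp n out) := by unfold Spec_dp; infer_instance

-- ===== CLAIM (what is proved, stated in full; the proofs are below) =====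
def Claim_equal_dp : Prop := ∀ (n : Int), Dom_dp n → Spec_dp n (dp n)

-- ===== LEMMAS AND PROOFS =====

-- A's factorial quotient is the binomial coefficient
lemma term_eq (N k : Nat) (hk1 : 1 ≤ k) (hk : k ≤ N / 2) :
    PySem.Int.floordiv (pyFactorial ((N : Int) - (k : Int)))
        (pyFactorial (k : Int) * pyFactorial ((N : Int) - 2 * (k : Int)))
      = ((N - k).choose k : Int) := by
  have h2k : 2 * k ≤ N := by omega
  have e1 : ((N : Int) - (k : Int)).toNat = N - k := by omega
  have e2 : ((k : Int)).toNat = k := by omega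
  have e3 : ((N : Int) - 2 * (k : Int)).toNat = N - 2 * k := by omega
  unfold pyFactorial
  rw [e1, e2, e3]
  have hmul : ((k.factorial : Int)) * ((N - 2 * k).factorial : Int)
      = (((k.factorial * (N - 2 * k).factorial : Nat)) : Int) := by push_cast; ring
  rw [hmul, PySem.Int.floordiv_natCast]
  congr 1
  have hc : (N - k).choose k * k.factorial * (N - k - k).factorial = (N - k).factorial :=
    Nat.choose_mul_factorial_mul_factorial (by omega)
  have hkk : N - k - k = N - 2 * k := by omega
  rw [hkk] at hc
  rw [← hc, Nat.mul_assoc, Nat.mul_div_cancel _ (by positivity)]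

-- a running-sum foldl is init + sum of the per-element terms
lemma foldl_add_gen {α : Type} (xs : List α) (t : α → Int) (init : Int) :
    xs.foldl (fun r i => r + t i) init = init + (xs.map t).sum := by
  induction xs generalizing init with
  | nil => simp
  | cons x xs ih => simp [ih]; ring

lemma sum_map_range_int (K : Nat) (t : Nat → Int) :
    ((List.range K).map t).sum = ∑ k ∈ Finset.range K, t k := by
  induction K with
  | zero => simp
  | succ K ih => rw [List.range_succ, Finset.sum_range_succ, ← ih]; simp

-- the diagonal binomial sum is a Fibonacci number
lemma sum_choose_diag (N : Nat) :
    ∑ j ∈ Finset.range (N / 2 + 1), (N - j).choose j = Nat.fib (N + 1) := by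
  have h2 : Nat.fib (N + 1) = ∑ j ∈ Finset.range (N + 1), (N - j).choose j := by
    rw [Nat.fib_succ_eq_sum_choose,
      Finset.Nat.sum_antidiagonal_eq_sum_range_succ (fun a b => Nat.choose a b),
      ← Finset.sum_range_reflect]
    refine Finset.sum_congr rfl fun j hj => ?_
    simp only [Finset.mem_range] at hj
    congr 1
    omega
  rw [h2]
  refine Finset.sum_subset
    (fun x hx => Finset.mem_range.mpr (by simp only [Finset.mem_range] at hx; omega))
    fun j hj hj2 => ?_
  simp only [Finset.mem_range] at hj hj2
  exact Nat.choose_eq_zero_of_lt (by omega)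

-- B's fold invariant: the pair carries two consecutive Fibonacci numbers mod 15746
lemma fib_fold (k : Nat) :
    (List.range k).foldl
        (fun (ab : Int × Int) _ => (ab.2, PySem.Int.mod (ab.1 + ab.2) 15746)) (1, 2)
      = (((Nat.fib (k + 2) % 15746 : Nat) : Int), ((Nat.fib (k + 3) % 15746 : Nat) : Int)) := by
  induction k with
  | zero => decide
  | succ k ih =>
    rw [List.range_succ, List.foldl_append, ih]
    simp only [List.foldl_cons, List.foldl_nil]
    refine Prod.ext (by norm_num) ?_
    show PySem.Int.mod _ 15746 = _
    rw [PySem.Int.mod_eq_emod_of_pos (by norm_num)]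
    have h4 : Nat.fib (k + 1 + 3) = Nat.fib (k + 2) + Nat.fib (k + 3) :=
      Nat.fib_add_two
    rw [h4]
    push_cast
    omega

lemma dp_alt_eq (N : Nat) (h : 3 ≤ N) :
    dp_alt (N : Int) = ((Nat.fib (N + 1) % 15746 : Nat) : Int) := by
  have hlt : ¬ ((N : Int) < 3) := by exact_mod_cast Nat.not_lt.mpr h
  rw [dp_alt, if_neg hlt, PySem.List.pyRange_one, List.foldl_map]
  have ht : ((N : Int) - 2 - 0).toNat = N - 2 := by omega
  rw [ht, fib_fold (N - 2)]
  have : N - 2 + 3 = N + 1 := by omega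
  rw [this]

lemma dp_eq (N : Nat) (h : 3 ≤ N) :
    dp (N : Int) = ((Nat.fib (N + 1) % 15746 : Nat) : Int) := by
  have hlt : ¬ ((N : Int) < 3) := by exact_mod_cast Nat.not_lt.mpr h
  have hm : PySem.Int.floordiv (N : Int) 2 = ((N / 2 : Nat) : Int) := by
    exact_mod_cast PySem.Int.floordiv_natCast N 2
  have hmod2 : PySem.Int.mod (N : Int) 2 = ((N % 2 : Nat) : Int) := by
    exact_mod_cast PySem.Int.mod_natCast N 2
  have hrange : PySem.List.pyRange 0 (PySem.Int.floordiv (N : Int) 2 + 1) 1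
      = (List.range (N / 2 + 1)).map (fun k : Nat => (0 : Int) + (k : Int)) := by
    rw [hm, PySem.List.pyRange_one]
    have ht : ((((N / 2 : Nat) : Int)) + 1 - 0).toNat = N / 2 + 1 := by omega
    rw [ht]
  rw [dp, if_neg hlt]
  have key : ∀ (res : Int), res = ((Nat.fib (N + 1) : Nat) : Int) →
      PySem.Int.mod res 15746 = ((Nat.fib (N + 1) % 15746 : Nat) : Int) := by
    intro res hres
    rw [hres]
    exact_mod_cast PySem.Int.mod_natCast (Nat.fib (N + 1)) 15746
  show PySem.Int.mod _ 15746 = _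
  apply key
  have hsum : ((∑ k ∈ Finset.range (N / 2 + 1), ((N - k).choose k : Int)))
      = ((Nat.fib (N + 1) : Nat) : Int) := by
    rw [← sum_choose_diag N]
    push_cast
    rfl
  by_cases hev : N % 2 = 0
  · rw [if_pos (by rw [hmod2, hev]; rfl), hrange, List.foldl_map]
    have hfun : (fun (r : Int) (k : Nat) =>
        (fun result i =>
            if i = 0 then result + 1
            else if i = PySem.Int.floordiv (N : Int) 2 then result + 1
            else result + PySem.Int.floordiv (pyFactorial ((N : Int) - i))
                   (pyFactorial i * pyFactorial ((N : Int) - 2 * i))) r ((0 : Int) + (k : Int)))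
        = fun (r : Int) (k : Nat) => r +
            (fun k : Nat =>
              if (k : Int) = 0 then (1 : Int)
              else if (k : Int) = ((N / 2 : Nat) : Int) then 1
              else PySem.Int.floordiv (pyFactorial ((N : Int) - (k : Int)))
                     (pyFactorial (k : Int) * pyFactorial ((N : Int) - 2 * (k : Int)))) k := by
      funext r k
      simp only [zero_add, hm]
      split_ifs <;> ring
    rw [hfun, foldl_add_gen, sum_map_range_int, zero_add, ← hsum]
    refine Finset.sum_congr rfl fun k hk => ?_
    simp only [Finset.mem_range] at hk
    by_cases h0 : k = 0
    · simp [h0]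
    · rw [if_neg (by exact_mod_cast h0)]
      by_cases hmid : k = N / 2
      · rw [if_pos (by exact_mod_cast congrArg (fun x : Nat => (x : Int)) hmid), hmid]
        have : N - N / 2 = N / 2 := by omega
        rw [this, Nat.choose_self]
        norm_num
      · rw [if_neg (by exact_mod_cast hmid)]
        exact term_eq N k (by omega) (by omega)
  · rw [if_neg (by rw [hmod2]; exact_mod_cast (by omega : ¬ ((N % 2 : Nat) : Int) = ((0:Nat):Int)))]
    rw [hrange, List.foldl_map]
    have hfun : (fun (r : Int) (k : Nat) =>
        (fun result i =>
            if i = 0 then result + 1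
            else result + PySem.Int.floordiv (pyFactorial ((N : Int) - i))
                   (pyFactorial i * pyFactorial ((N : Int) - 2 * i))) r ((0 : Int) + (k : Int)))
        = fun (r : Int) (k : Nat) => r +
            (fun k : Nat =>
              if (k : Int) = 0 then (1 : Int)
              else PySem.Int.floordiv (pyFactorial ((N : Int) - (k : Int)))
                     (pyFactorial (k : Int) * pyFactorial ((N : Int) - 2 * (k : Int)))) k := by
      funext r k
      simp only [zero_add]
      split_ifs <;> ring
    rw [hfun, foldl_add_gen, sum_map_range_int, zero_add, ← hsum]
    refine Finset.sum_congr rfl fun k hk => ?_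
    simp only [Finset.mem_range] at hk
    by_cases h0 : k = 0
    · simp [h0]
    · rw [if_neg (by exact_mod_cast h0)]
      exact term_eq N k (by omega) (by omega)

-- ===== VERDICT (by name: the statement is the Claim_ definition above) =====
theorem dp_spec : Claim_equal_dp := by
  intro n _
  unfold Spec_dp
  by_cases h : n < 3
  · simp [dp, dp_alt, h]
  · obtain ⟨N, rfl⟩ : ∃ N : Nat, n = (N : Int) :=
      ⟨n.toNat, (Int.toNat_of_nonneg (by omega)).symm⟩
    have hN : 3 ≤ N := by exact_mod_cast Int.not_lt.mp h
    rw [dp_eq N hN, dp_alt_eq N hN]
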